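-- pv_equiv track=rewrite | github.com/MatsuTaku/PythonToTrial | prac7.py | matchings
-- ===== SOURCE A (Python) =====
-- def matchings(mdi, wdi):
--     mnames = mdi.keys()
--     count = 0
--     for mname in mnames:
--         wname = mdi[mname]
--         if mname == wdi.get(wname):
--             count += 1
--     return count
-- ===== SOURCE B (Python) =====
-- def matchings(mdi, wdi):
--     mpairs = set(mdi.items())
--     wpairs = {(v, k) for k, v in wdi.items()}
--     return len(mpairs & wpairs)
-- ===== Notes on version B (the rewrite author's own statement) =====
-- stated objective: idiomatic
-- what changed: Replaces the explicit per-key loop with a counter and per-element dict lookups by materializing both mappings as sets of (man, woman) pairs (wdi inverted) and returning the size of their intersection.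
import Mathlib
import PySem

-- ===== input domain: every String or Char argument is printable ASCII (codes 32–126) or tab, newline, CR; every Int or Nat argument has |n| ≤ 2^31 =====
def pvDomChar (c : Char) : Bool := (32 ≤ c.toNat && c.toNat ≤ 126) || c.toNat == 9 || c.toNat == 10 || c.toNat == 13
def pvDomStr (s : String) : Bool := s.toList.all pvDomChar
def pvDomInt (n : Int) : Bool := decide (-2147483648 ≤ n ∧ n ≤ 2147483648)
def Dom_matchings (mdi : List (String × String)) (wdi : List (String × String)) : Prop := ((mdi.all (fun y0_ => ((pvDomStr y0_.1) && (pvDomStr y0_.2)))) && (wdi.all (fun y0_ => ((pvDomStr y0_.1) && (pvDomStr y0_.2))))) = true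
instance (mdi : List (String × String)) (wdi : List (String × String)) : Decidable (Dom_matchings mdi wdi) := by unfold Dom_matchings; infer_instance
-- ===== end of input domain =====

-- B replaces A's per-key loop with dict lookups by a set intersection of (man, woman) pairs (wdi inverted); idiomatic, same cost.
-- Pre_ excludes association lists with duplicate keys, which represent no Python dict (dict keys are unique).


-- ===== PORT A =====
-- for mname in mdi.keys(): if mname == wdi.get(mdi[mname]): count += 1
-- mdi[mname] is ported as getD with default "": mname comes from mdi.keys(), so the key is always present.
def matchings (mdi : List (String × String)) (wdi : List (String × String)) : Int :=
  let m := PySem.Dict.mk mdi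
  let w := PySem.Dict.mk wdi
  m.keys.foldl (fun count mname =>
    let wname := m.getD mname ""
    if w.get? wname = some mname then count + 1 else count) 0

-- ===== PORT B =====
-- mpairs = set(mdi.items()); wpairs = {(v, k) for k, v in wdi.items()}; len(mpairs & wpairs)
def matchings_alt (mdi : List (String × String)) (wdi : List (String × String)) : Int :=
  let mpairs : PySem.Set (String × String) := PySem.Set.ofList mdi
  let wpairs : PySem.Set (String × String) := PySem.Set.ofList (wdi.map (fun p => (p.2, p.1)))
  PySem.Set.len (PySem.Set.inter mpairs wpairs)

-- ===== PRECONDITION & SPEC =====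
-- Pre_ excludes association lists with duplicate keys: a Python dict has unique keys, so such lists do not
-- represent any input the Python programs can receive.
def Pre_matchings (mdi : List (String × String)) (wdi : List (String × String)) : Prop :=
  (mdi.map Prod.fst).Nodup ∧ (wdi.map Prod.fst).Nodup
instance (mdi : List (String × String)) (wdi : List (String × String)) : Decidable (Pre_matchings mdi wdi) := by unfold Pre_matchings; infer_instance

def pvWitness_matchings : (List (String × String)) × (List (String × String)) :=
  ([("adam", "eve"), ("bob", "carol")], [("eve", "adam"), ("carol", "dan")])

def Spec_matchings (mdi : List (String × String)) (wdi : List (String × String)) (out : Int) : Prop := out = matchings_alt mdi wdi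
instance (mdi : List (String × String)) (wdi : List (String × String)) (out : Int) : Decidable (Spec_matchings mdi wdi out) := by unfold Spec_matchings; infer_instance

-- ===== CLAIM (what is proved, stated in full; the proofs are below) =====
def Claim_equal_matchings : Prop := ∀ (mdi : List (String × String)) (wdi : List (String × String)), Dom_matchings mdi wdi → Pre_matchings mdi wdi → Spec_matchings mdi wdi (matchings mdi wdi)

-- ===== LEMMAS AND PROOFS =====

-- the counting loop shape of A, in Prop-conditioned form (bridge to PySem.List.foldl_count_if)
theorem foldl_if_count {α : Type} (P : α → Prop) [DecidablePred P] (l : List α) (n : Int) :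
    l.foldl (fun c x => if P x then c + 1 else c) n = n + l.countP (fun x => decide (P x)) := by
  have := PySem.List.foldl_count_if (fun x => decide (P x)) l n
  simpa using this

-- A's loop counts the mdi pairs whose reversal occurs in wdi.
theorem matchings_eq_countP (mdi wdi : List (String × String))
    (hm : (mdi.map Prod.fst).Nodup) (hw : (wdi.map Prod.fst).Nodup) :
    matchings mdi wdi = (mdi.countP (fun p => decide ((p.2, p.1) ∈ wdi)) : Int) := by
  unfold matchings
  simp only [PySem.Dict.keys_mk]
  rw [foldl_if_count]
  simp only [List.countP_map, zero_add, Int.natCast_inj]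
  apply List.countP_congr
  intro p hp
  have hkeys : (PySem.Dict.mk mdi).keys.Nodup := by simpa [PySem.Dict.keys_mk] using hm
  have hget : (PySem.Dict.mk mdi).getD p.1 "" = p.2 :=
    PySem.Dict.getD_of_mem_items (PySem.Dict.mk mdi) (by simpa using hp) hkeys ""
  have hwkeys : (PySem.Dict.mk wdi).keys.Nodup := by simpa [PySem.Dict.keys_mk] using hw
  have hiff : (PySem.Dict.mk wdi).get? p.2 = some p.1 ↔ (p.2, p.1) ∈ wdi := by
    rw [PySem.Dict.get?_eq_some_iff_mem_items _ _ _ hwkeys]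
  simp [Function.comp, hget, hiff]

-- B's intersection is the same count.
theorem matchings_alt_eq_countP (mdi wdi : List (String × String))
    (hm : (mdi.map Prod.fst).Nodup) :
    matchings_alt mdi wdi = (mdi.countP (fun p => decide ((p.2, p.1) ∈ wdi)) : Int) := by
  unfold matchings_alt
  have hnd : mdi.Nodup := hm.of_map
  rw [PySem.Set.ofList_eq_self_of_nodup mdi hnd]
  simp only [PySem.Set.len, PySem.Set.inter, ← List.countP_eq_length_filter,
    Int.natCast_inj]
  apply List.countP_congr
  intro p _
  simp only [PySem.Set.contains, PySem.Set.mem_ofList, List.contains_iff_mem, List.mem_map, decide_eq_true_eq]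
  constructor
  · rintro ⟨q, hq, rfl⟩; simpa using hq
  · intro h; exact ⟨(p.2, p.1), h, rfl⟩

-- ===== VERDICT (by name: the statement is the Claim_ definition above) =====
theorem matchings_spec : Claim_equal_matchings := by
  intro mdi wdi _ hpre
  unfold Spec_matchings
  rw [matchings_eq_countP mdi wdi hpre.1 hpre.2, matchings_alt_eq_countP mdi wdi hpre.1]
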